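-- pv_equiv track=rewrite | github.com/apache/mxnet | python/mxnet/rnn/io.py | encode_sentences
-- ===== SOURCE A (Python) =====
-- def encode_sentences(sentences, vocab=None, invalid_label=-1, invalid_key='\n', start_label=0):
--     """Encode sentences and (optionally) build a mapping
--     from string tokens to integer indices. Unknown keys
--     will be added to vocabulary.
--
--     Parameters
--     ----------
--     sentences : list of list of str
--         A list of sentences to encode. Each sentence
--         should be a list of string tokens.
--     vocab : None or dict of str -> int
--         Optional input Vocabulary
--     invalid_label : int, default -1
--         Index for invalid token, like <end-of-sentence>
--     invalid_key : str, default '\\n'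
--         Key for invalid token. Use '\\n' for end
--         of sentence by default.
--     start_label : int
--         lowest index.
--
--     Returns
--     -------
--     result : list of list of int
--         encoded sentences
--     vocab : dict of str -> int
--         result vocabulary
--     """
--     idx = start_label
--     if vocab is None:
--         vocab = {invalid_key: invalid_label}
--         new_vocab = True
--     else:
--         new_vocab = False
--     res = []
--     for sent in sentences:
--         coded = []
--         for word in sent:
--             if word not in vocab:
--                 assert new_vocab, "Unknown token %s"%word
--                 if idx == invalid_label:
--                     idx += 1
--                 vocab[word] = idx
--                 idx += 1
--             coded.append(vocab[word])
--         res.append(coded)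
--
--     return res, vocab
-- ===== SOURCE B (Python) =====
-- def encode_sentences(sentences, vocab=None, invalid_label=-1, invalid_key='\n', start_label=0):
--     """Two-phase re-implementation: first build the vocabulary over all
--     sentences, then encode every sentence by plain lookup."""
--     if vocab is None:
--         vocab = {invalid_key: invalid_label}
--         new_vocab = True
--     else:
--         new_vocab = False
--     idx = start_label
--     # phase 1: complete the vocabulary
--     for sent in sentences:
--         for word in sent:
--             if word not in vocab:
--                 assert new_vocab, "Unknown token %s"%word
--                 if idx == invalid_label:
--                     idx += 1
--                 vocab[word] = idx
--                 idx += 1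
--     # phase 2: encode by lookup only
--     res = [[vocab[word] for word in sent] for sent in sentences]
--     return res, vocab
-- ===== Notes on version B (the rewrite author's own statement) =====
-- stated objective: alternative
-- what changed: The single interleaved loop that grows the vocabulary while emitting codes is split into two distinct phases: a first pass that only builds the vocabulary (same in-place mutation and invalid_label skip) and a second pass that encodes every sentence by pure lookup in the now-complete vocabulary.
import Mathlib
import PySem

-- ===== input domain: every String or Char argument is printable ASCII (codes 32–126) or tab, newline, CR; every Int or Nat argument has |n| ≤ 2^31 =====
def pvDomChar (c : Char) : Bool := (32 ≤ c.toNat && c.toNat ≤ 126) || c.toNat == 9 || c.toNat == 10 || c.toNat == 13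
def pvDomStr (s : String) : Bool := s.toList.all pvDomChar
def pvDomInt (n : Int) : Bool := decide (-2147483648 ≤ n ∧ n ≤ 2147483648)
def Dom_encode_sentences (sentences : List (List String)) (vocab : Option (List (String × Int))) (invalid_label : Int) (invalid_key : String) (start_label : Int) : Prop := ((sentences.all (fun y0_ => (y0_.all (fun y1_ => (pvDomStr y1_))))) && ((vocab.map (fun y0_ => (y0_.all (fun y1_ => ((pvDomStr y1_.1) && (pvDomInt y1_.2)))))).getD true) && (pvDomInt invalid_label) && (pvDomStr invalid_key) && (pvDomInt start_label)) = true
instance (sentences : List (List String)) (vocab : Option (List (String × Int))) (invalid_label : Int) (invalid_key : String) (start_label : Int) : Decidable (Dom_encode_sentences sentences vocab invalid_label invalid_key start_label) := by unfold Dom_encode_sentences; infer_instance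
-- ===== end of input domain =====

-- B replaces A's single interleaved build-and-encode loop by two distinct phases (build the
-- vocabulary first, then encode by lookup); same cost, different decomposition ("alternative").
-- A mutates a caller-supplied vocab dict in place only by adding fresh keys; B performs the same
-- mutation, and the equivalence proved here is about the returned (res, vocab) pair.

-- ===== PORT A =====
-- inner loop body: `if word not in vocab: …; coded.append(vocab[word])`.
-- The `assert new_vocab` raises for an unknown word with a caller-supplied vocab; those inputs are
-- excluded by Pre_encode_sentences, so the port simply proceeds there.
def encA_word (invalid_label : Int) (st : Int × PySem.Dict String Int × List Int) (w : String) : Int × PySem.Dict String Int × List Int :=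
  if st.2.1.contains w then
    (st.1, st.2.1, st.2.2 ++ [st.2.1.getD w 0])   -- getD exact: w is present
  else
    let i := if st.1 = invalid_label then st.1 + 1 else st.1
    let d := st.2.1.insert w i
    (i + 1, d, st.2.2 ++ [d.getD w 0])            -- getD exact: w was just inserted

def encA_sent (invalid_label : Int) (st : Int × PySem.Dict String Int × List (List Int)) (sent : List String) : Int × PySem.Dict String Int × List (List Int) :=
  let r := sent.foldl (encA_word invalid_label) (st.1, st.2.1, [])
  (r.1, r.2.1, st.2.2 ++ [r.2.2])

def encode_sentences (sentences : List (List String)) (vocab : Option (List (String × Int))) (invalid_label : Int) (invalid_key : String) (start_label : Int) : List (List Int) × (List (String × Int)) :=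
  let d0 : PySem.Dict String Int :=
    match vocab with
    | none => PySem.Dict.ofList [(invalid_key, invalid_label)]
    | some v => PySem.Dict.ofList v
  let r := sentences.foldl (encA_sent invalid_label) (start_label, d0, [])
  (r.2.2, r.2.1.items)

-- ===== PORT B =====
-- phase-1 body: grow the vocabulary only (the same assert is excluded by Pre_encode_sentences).
def bStep (invalid_label : Int) (st : Int × PySem.Dict String Int) (w : String) : Int × PySem.Dict String Int :=
  if st.2.contains w then st
  else
    let i := if st.1 = invalid_label then st.1 + 1 else st.1
    (i + 1, st.2.insert w i)

def encode_sentences_alt (sentences : List (List String)) (vocab : Option (List (String × Int))) (invalid_label : Int) (invalid_key : String) (start_label : Int) : List (List Int) × (List (String × Int)) :=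
  let d0 : PySem.Dict String Int :=
    match vocab with
    | none => PySem.Dict.ofList [(invalid_key, invalid_label)]
    | some v => PySem.Dict.ofList v
  let r := sentences.foldl (fun st sent => sent.foldl (bStep invalid_label) st) (start_label, d0)
  -- phase 2: vocab[word]; getD exact since after phase 1 every word is a key (under Pre_)
  (sentences.map (fun s => s.map (fun w => r.2.getD w 0)), r.2.items)

-- ===== PRECONDITION & SPEC =====
-- Pre_ excludes exactly the inputs on which Python A raises AssertionError: a caller-supplied
-- vocab together with a word of some sentence that is not among its keys.
def Pre_encode_sentences (sentences : List (List String)) (vocab : Option (List (String × Int))) (invalid_label : Int) (invalid_key : String) (start_label : Int) : Prop :=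
  (vocab.all (fun v => sentences.all (fun s => s.all (fun w => v.any (fun p => p.1 == w))))) = true
instance (sentences : List (List String)) (vocab : Option (List (String × Int))) (invalid_label : Int) (invalid_key : String) (start_label : Int) : Decidable (Pre_encode_sentences sentences vocab invalid_label invalid_key start_label) := by unfold Pre_encode_sentences; infer_instance

def pvWitness_encode_sentences : List (List String) × (Option (List (String × Int))) × Int × String × Int :=
  ([["a", "b"], ["a"]], none, -1, "\n", 0)

def Spec_encode_sentences (sentences : List (List String)) (vocab : Option (List (String × Int))) (invalid_label : Int) (invalid_key : String) (start_label : Int) (out : List (List Int) × (List (String × Int))) : Prop := out = encode_sentences_alt sentences vocab invalid_label invalid_key start_label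
instance (sentences : List (List String)) (vocab : Option (List (String × Int))) (invalid_label : Int) (invalid_key : String) (start_label : Int) (out : List (List Int) × (List (String × Int))) : Decidable (Spec_encode_sentences sentences vocab invalid_label invalid_key start_label out) := by unfold Spec_encode_sentences; infer_instance

-- ===== CLAIM (what is proved, stated in full; the proofs are below) =====
def Claim_equal_encode_sentences : Prop := ∀ (sentences : List (List String)) (vocab : Option (List (String × Int))) (invalid_label : Int) (invalid_key : String) (start_label : Int), Dom_encode_sentences sentences vocab invalid_label invalid_key start_label → Pre_encode_sentences sentences vocab invalid_label invalid_key start_label → Spec_encode_sentences sentences vocab invalid_label invalid_key start_label (encode_sentences sentences vocab invalid_label invalid_key start_label)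

-- ===== LEMMAS AND PROOFS =====

-- `DSub d d'`: d' agrees with d on every key of d (the vocabulary only grows, values never change).
def DSub (d d' : PySem.Dict String Int) : Prop :=
  ∀ w, d.contains w = true → d'.get? w = d.get? w

lemma dsub_refl (d : PySem.Dict String Int) : DSub d d := fun _ _ => rfl

lemma dsub_contains {d d' : PySem.Dict String Int} (h : DSub d d') {w : String}
    (hw : d.contains w = true) : d'.contains w = true := by
  rw [PySem.Dict.contains_eq_isSome_get?, h w hw, ← PySem.Dict.contains_eq_isSome_get?]
  exact hw

lemma dsub_trans {a b c : PySem.Dict String Int} (h1 : DSub a b) (h2 : DSub b c) : DSub a c :=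
  fun w hw => by rw [h2 w (dsub_contains h1 hw), h1 w hw]

lemma dsub_getD {d d' : PySem.Dict String Int} (h : DSub d d') {w : String}
    (hw : d.contains w = true) : d'.getD w 0 = d.getD w 0 := by
  rw [PySem.Dict.getD_eq_get?_getD, PySem.Dict.getD_eq_get?_getD, h w hw]

lemma dsub_bStep (il : Int) (st : Int × PySem.Dict String Int) (w : String) :
    DSub st.2 (bStep il st w).2 := by
  intro w' hw'
  unfold bStep
  split
  · rfl
  · rename_i hc
    apply PySem.Dict.get?_insert_of_ne
    intro he
    rw [he] at hw'
    simp [hw'] at hc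

lemma dsub_foldl (il : Int) (sent : List String) :
    ∀ st : Int × PySem.Dict String Int, DSub st.2 ((sent.foldl (bStep il) st).2) := by
  induction sent with
  | nil => intro st; exact dsub_refl _
  | cons w ws ih =>
    intro st
    exact dsub_trans (dsub_bStep il st w) (ih (bStep il st w))

lemma dsub_foldlAll (il : Int) (sents : List (List String)) :
    ∀ st : Int × PySem.Dict String Int,
      DSub st.2 ((sents.foldl (fun st s => s.foldl (bStep il) st) st).2) := by
  induction sents with
  | nil => intro st; exact dsub_refl _
  | cons s ss ih =>
    intro st
    exact dsub_trans (dsub_foldl il s st) (ih (s.foldl (bStep il) st))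

-- codes of one sentence, reading each word's value at the moment A processes it
def codes (il : Int) : List String → Int × PySem.Dict String Int → List Int
  | [], _ => []
  | w :: ws, st => (bStep il st w).2.getD w 0 :: codes il ws (bStep il st w)

def codesAll (il : Int) : List (List String) → Int × PySem.Dict String Int → List (List Int)
  | [], _ => []
  | s :: ss, st => codes il s st :: codesAll il ss (s.foldl (bStep il) st)

lemma inner_eq (il : Int) (sent : List String) :
    ∀ (i : Int) (d : PySem.Dict String Int) (cs : List Int),
      sent.foldl (encA_word il) (i, d, cs)
        = ((sent.foldl (bStep il) (i, d)).1, (sent.foldl (bStep il) (i, d)).2,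
            cs ++ codes il sent (i, d)) := by
  induction sent with
  | nil => intro i d cs; simp [codes]
  | cons w ws ih =>
    intro i d cs
    by_cases hc : d.contains w = true
    · simp only [List.foldl_cons, encA_word, bStep, hc, if_pos, codes, ih]
      simp
    · simp only [List.foldl_cons, encA_word, bStep, hc, codes, ih]
      simp

lemma codes_eq (il : Int) (sent : List String) :
    ∀ (st : Int × PySem.Dict String Int) (D : PySem.Dict String Int),
      DSub ((sent.foldl (bStep il) st).2) D →
      codes il sent st = sent.map (fun w => D.getD w 0) := by
  induction sent with
  | nil => intro st D _; simp [codes]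
  | cons w ws ih =>
    intro st D hD
    have hD' : DSub ((ws.foldl (bStep il) (bStep il st w)).2) D := by
      simpa using hD
    have hsub : DSub (bStep il st w).2 D :=
      dsub_trans (dsub_foldl il ws (bStep il st w)) hD'
    have hcont : (bStep il st w).2.contains w = true := by
      unfold bStep
      split
      · assumption
      · exact PySem.Dict.contains_insert_self _ _ _
    simp [codes, ih (bStep il st w) D hD', dsub_getD hsub hcont]

lemma outer_eq (il : Int) (sents : List (List String)) :
    ∀ (i : Int) (d : PySem.Dict String Int) (acc : List (List Int)),
      sents.foldl (encA_sent il) (i, d, acc)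
        = ((sents.foldl (fun st s => s.foldl (bStep il) st) (i, d)).1,
           (sents.foldl (fun st s => s.foldl (bStep il) st) (i, d)).2,
           acc ++ codesAll il sents (i, d)) := by
  induction sents with
  | nil => intro i d acc; simp [codesAll]
  | cons s ss ih =>
    intro i d acc
    simp only [List.foldl_cons, encA_sent, inner_eq il s i d [], List.nil_append, codesAll]
    cases hb : s.foldl (bStep il) (i, d) with
    | mk i' d' =>
      simp [ih i' d']

lemma codesAll_eq (il : Int) (sents : List (List String)) :
    ∀ (st : Int × PySem.Dict String Int) (D : PySem.Dict String Int),
      DSub ((sents.foldl (fun st s => s.foldl (bStep il) st) st).2) D →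
      codesAll il sents st = sents.map (fun s => s.map (fun w => D.getD w 0)) := by
  induction sents with
  | nil => intro st D _; simp [codesAll]
  | cons s ss ih =>
    intro st D hD
    have hD' : DSub ((ss.foldl (fun st s => s.foldl (bStep il) st) (s.foldl (bStep il) st)).2) D := by
      simpa using hD
    have hs : DSub ((s.foldl (bStep il) st).2) D :=
      dsub_trans (dsub_foldlAll il ss (s.foldl (bStep il) st)) hD'
    simp [codesAll, codes_eq il s st D hs, ih (s.foldl (bStep il) st) D hD']

-- ===== VERDICT (by name: the statement is the Claim_ definition above) =====
theorem encode_sentences_spec : Claim_equal_encode_sentences := by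
  intro sentences vocab invalid_label invalid_key start_label _ _
  unfold Spec_encode_sentences encode_sentences encode_sentences_alt
  cases vocab with
  | none =>
    simp only [outer_eq, List.nil_append]
    rw [codesAll_eq _ _ _ _ (dsub_refl _)]
  | some v =>
    simp only [outer_eq, List.nil_append]
    rw [codesAll_eq _ _ _ _ (dsub_refl _)]
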